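-- pv_equiv track=rewrite | github.com/MrMichel93/Intro-to-DS-A | queues/solutions/solution_generate_binary.py | generate_binary
-- ===== SOURCE A (Python) =====
-- from collections import deque
--
-- def generate_binary(n):
--     result = []
--     queue = deque(['1'])
--     for _ in range(n):
--         binary = queue.popleft()
--         result.append(binary)
--         queue.append(binary + '0')
--         queue.append(binary + '1')
--     return result
-- ===== SOURCE B (Python) =====
-- def generate_binary(n):
--     # Closed form: the i-th BFS output is the binary representation of i+1.
--     def to_bin(m):
--         return (to_bin(m // 2) + ("1" if m % 2 == 1 else "0")) if m > 1 else "1"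
--     return [to_bin(i + 1) for i in range(n)]
-- ===== Notes on version B (the rewrite author's own statement) =====
-- stated objective: simpler
-- what changed: Replaced the BFS deque that pops each string and enqueues its '0'/'1' extensions by a closed form: the i-th output is the binary representation of i+1, computed directly per index.
import Mathlib
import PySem

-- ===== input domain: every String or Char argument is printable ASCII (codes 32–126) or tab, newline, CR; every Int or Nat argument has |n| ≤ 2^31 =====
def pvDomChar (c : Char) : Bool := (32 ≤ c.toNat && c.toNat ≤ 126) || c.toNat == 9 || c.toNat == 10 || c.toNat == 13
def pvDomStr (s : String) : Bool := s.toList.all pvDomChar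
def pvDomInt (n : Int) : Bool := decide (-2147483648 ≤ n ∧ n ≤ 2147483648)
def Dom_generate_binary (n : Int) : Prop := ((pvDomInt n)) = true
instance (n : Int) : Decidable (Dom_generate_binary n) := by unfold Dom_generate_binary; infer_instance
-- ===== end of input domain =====

-- B replaces A's BFS deque by the closed form "i-th output = binary of i+1"; objective: simpler.

-- ===== PORT A =====
-- one loop iteration: pop the left end of the queue, append it to result, enqueue its two extensions
def pvStepA (st : List String × List String) (_ : Int) : List String × List String :=
  match st with
  | (res, []) => (res, [])      -- unreachable: the queue gains one element per iteration and starts nonempty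
  | (res, b :: q) => (res ++ [b], (q ++ [b ++ "0"]) ++ [b ++ "1"])

def generate_binary (n : Int) : List String :=
  ((PySem.List.pyRange 0 n 1).foldl pvStepA ([], ["1"])).1

-- ===== PORT B =====
-- Source B's to_bin helper (only ever called with m ≥ 1, hence a Nat argument is exact)
def pvToBin (m : Nat) : String :=
  if 1 < m then pvToBin (m / 2) ++ (if m % 2 == 1 then "1" else "0") else "1"
decreasing_by exact Nat.div_lt_self (by omega) (by omega)

def generate_binary_alt (n : Int) : List String :=
  (PySem.List.pyRange 0 n 1).map (fun i => pvToBin (i + 1).toNat)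

-- ===== PRECONDITION & SPEC =====
def Spec_generate_binary (n : Int) (out : List String) : Prop := out = generate_binary_alt n
instance (n : Int) (out : List String) : Decidable (Spec_generate_binary n out) := by unfold Spec_generate_binary; infer_instance

-- ===== CLAIM (what is proved, stated in full; the proofs are below) =====
def Claim_equal_generate_binary : Prop := ∀ (n : Int), Dom_generate_binary n → Spec_generate_binary n (generate_binary n)

-- ===== LEMMAS AND PROOFS =====

-- the segment [toBin a, toBin (a+1), …, toBin (a+len-1)]
def pvSeg (a len : Nat) : List String := (List.range len).map (fun i => pvToBin (a + i))

theorem pvToBin_one : pvToBin 1 = "1" := by rw [pvToBin]; simp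

theorem pvToBin_two_mul (a : Nat) (h : 1 ≤ a) : pvToBin (2 * a) = pvToBin a ++ "0" := by
  rw [pvToBin, if_pos (by omega : 1 < 2 * a)]
  have h1 : 2 * a / 2 = a := by omega
  have h2 : 2 * a % 2 = 0 := by omega
  rw [h1, h2]; simp

theorem pvToBin_two_mul_add_one (a : Nat) (h : 1 ≤ a) : pvToBin (2 * a + 1) = pvToBin a ++ "1" := by
  rw [pvToBin, if_pos (by omega : 1 < 2 * a + 1)]
  have h1 : (2 * a + 1) / 2 = a := by omega
  have h2 : (2 * a + 1) % 2 = 1 := by omega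
  rw [h1, h2]; simp

theorem pvSeg_succ_right (a len : Nat) : pvSeg a (len + 1) = pvSeg a len ++ [pvToBin (a + len)] := by
  simp [pvSeg, List.range_succ]

theorem pvSeg_cons (a len : Nat) : pvSeg a (len + 1) = pvToBin a :: pvSeg (a + 1) len := by
  simp only [pvSeg, List.range_succ_eq_map, List.map_cons, List.map_map]
  refine congrArg₂ List.cons (by simp) ?_
  exact List.map_congr_left (fun i _ => by show pvToBin _ = pvToBin _; congr 1; omega)

theorem pv_loop_inv (l : List Int) : ∀ (a : Nat) (res : List String), 1 ≤ a →
    l.foldl pvStepA (res, pvSeg a a) =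
      (res ++ pvSeg a l.length, pvSeg (a + l.length) (a + l.length)) := by
  induction l with
  | nil => intro a res _; simp [pvSeg]
  | cons x l ih =>
    intro a res ha
    obtain ⟨b, rfl⟩ : ∃ b, a = b + 1 := ⟨a - 1, by omega⟩
    rw [List.foldl_cons, pvSeg_cons (b + 1) b]
    show l.foldl pvStepA
        (res ++ [pvToBin (b + 1)], (pvSeg (b + 2) b ++ [pvToBin (b + 1) ++ "0"]) ++ [pvToBin (b + 1) ++ "1"]) = _
    have hq : (pvSeg (b + 2) b ++ [pvToBin (b + 1) ++ "0"]) ++ [pvToBin (b + 1) ++ "1"] =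
        pvSeg (b + 2) (b + 2) := by
      rw [pvSeg_succ_right (b + 2) (b + 1), pvSeg_succ_right (b + 2) b]
      rw [show b + 2 + b = 2 * (b + 1) from by omega,
          show b + 2 + (b + 1) = 2 * (b + 1) + 1 from by omega,
          pvToBin_two_mul (b + 1) (by omega), pvToBin_two_mul_add_one (b + 1) (by omega)]
    rw [hq, ih (b + 2) (res ++ [pvToBin (b + 1)]) (by omega)]
    rw [Prod.mk.injEq]
    refine ⟨?_, ?_⟩
    · rw [List.append_assoc, List.length_cons, pvSeg_cons (b + 1) l.length]
      simp
    · simp only [List.length_cons]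
      congr 1 <;> omega

theorem pv_A_eq_seg (n : Int) :
    generate_binary n = pvSeg 1 (PySem.List.pyRange 0 n 1).length := by
  unfold generate_binary
  have h1 : ([("1" : String)]) = pvSeg 1 1 := by simp [pvSeg, pvToBin_one]
  rw [h1, pv_loop_inv (PySem.List.pyRange 0 n 1) 1 [] (by omega)]
  simp

-- ===== VERDICT (by name: the statement is the Claim_ definition above) =====
theorem generate_binary_spec : Claim_equal_generate_binary := by
  intro n _
  show generate_binary n = generate_binary_alt n
  rw [pv_A_eq_seg]
  unfold generate_binary_alt
  rw [PySem.List.length_pyRange_one, PySem.List.pyRange_one, List.map_map]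
  unfold pvSeg
  exact List.map_congr_left (fun i _ => by show pvToBin _ = pvToBin _; congr 1; simp; omega)
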